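-- pv_equiv track=rewrite | github.com/Marcussy34/chatbot | chatbot/planner.py | extract_location_info
-- ===== SOURCE A (Python) =====
-- from typing import Dict, List, Optional, Tuple, Any
--
-- def extract_location_info(user_input: str) -> Dict[str, str]:
--     """
--     Extract location-related information from user input.
--
--     Args:
--         user_input: User's message
--
--     Returns:
--         Dictionary with location details
--     """
--     info = {}
--     user_input_lower = user_input.lower()
--
--     # Extract specific locations
--     if 'ss2' in user_input_lower:
--         info['location'] = 'SS2'
--     elif any(loc in user_input_lower for loc in ['pj', 'petaling jaya']):
--         info['area'] = 'Petaling Jaya'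
--     elif any(loc in user_input_lower for loc in ['kl', 'kuala lumpur']):
--         info['area'] = 'Kuala Lumpur'
--
--     # Extract query type
--     if any(word in user_input_lower for word in ['time', 'hour', 'open', 'close']):
--         info['query_type'] = 'hours'
--     elif any(word in user_input_lower for word in ['address', 'where', 'direction']):
--         info['query_type'] = 'location'
--     elif any(word in user_input_lower for word in ['service', 'offer', 'available']):
--         info['query_type'] = 'services'
--
--     return info
-- ===== SOURCE B (Python) =====
-- _RULES = [
--     (('ss2',), 0, 0, 'location', 'SS2'),
--     (('pj', 'petaling jaya'), 0, 1, 'area', 'Petaling Jaya'),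
--     (('kl', 'kuala lumpur'), 0, 2, 'area', 'Kuala Lumpur'),
--     (('time', 'hour', 'open', 'close'), 1, 0, 'query_type', 'hours'),
--     (('address', 'where', 'direction'), 1, 1, 'query_type', 'location'),
--     (('service', 'offer', 'available'), 1, 2, 'query_type', 'services'),
-- ]
--
--
-- def extract_location_info(user_input: str) -> dict:
--     text = user_input.lower()
--     # full scan: collect every matching rule, no short-circuiting
--     hits = [(g, r, f, v) for kws, g, r, f, v in _RULES
--             if any(k in text for k in kws)]
--     info = {}
--     for group in (0, 1):
--         best = min((h for h in hits if h[0] == group), default=None)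
--         if best is not None:
--             info[best[2]] = best[3]
--     return info
-- ===== Notes on version B (the rewrite author's own statement) =====
-- stated objective: alternative
-- what changed: Instead of two short-circuiting if/elif cascades, B scans all six keyword rules once collecting every match into a hit list, then resolves precedence per rule group by taking the minimum-rank hit and writing that field.
import Mathlib
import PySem

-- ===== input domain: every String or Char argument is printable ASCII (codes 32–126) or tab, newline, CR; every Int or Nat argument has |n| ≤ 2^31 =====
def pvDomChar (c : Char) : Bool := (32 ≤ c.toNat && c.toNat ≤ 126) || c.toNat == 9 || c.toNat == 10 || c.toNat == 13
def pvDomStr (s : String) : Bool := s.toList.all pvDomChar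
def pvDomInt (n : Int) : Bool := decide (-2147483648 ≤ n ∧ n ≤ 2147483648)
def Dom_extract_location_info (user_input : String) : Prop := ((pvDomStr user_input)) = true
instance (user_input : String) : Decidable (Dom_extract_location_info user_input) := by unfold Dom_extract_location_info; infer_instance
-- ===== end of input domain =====

-- B replaces A's short-circuiting if/elif cascades by one full scan over a rule
-- table collecting all matches, then a min-rank resolution per rule group
-- (alternative algorithm, same cost).

-- ===== PORT A =====
def extract_location_info (user_input : String) : List (String × String) :=
  let user_input_lower := PySem.Str.lower user_input
  let info : PySem.Dict String String := PySem.Dict.empty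
  let info :=
    if PySem.Str.isIn "ss2" user_input_lower then
      PySem.Dict.insert info "location" "SS2"
    else if (["pj", "petaling jaya"]).any (fun loc => PySem.Str.isIn loc user_input_lower) then
      PySem.Dict.insert info "area" "Petaling Jaya"
    else if (["kl", "kuala lumpur"]).any (fun loc => PySem.Str.isIn loc user_input_lower) then
      PySem.Dict.insert info "area" "Kuala Lumpur"
    else info
  let info :=
    if (["time", "hour", "open", "close"]).any (fun w => PySem.Str.isIn w user_input_lower) then
      PySem.Dict.insert info "query_type" "hours"
    else if (["address", "where", "direction"]).any (fun w => PySem.Str.isIn w user_input_lower) then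
      PySem.Dict.insert info "query_type" "location"
    else if (["service", "offer", "available"]).any (fun w => PySem.Str.isIn w user_input_lower) then
      PySem.Dict.insert info "query_type" "services"
    else info
  info.items

-- ===== PORT B =====
def pvRules : List (List String × Int × Int × String × String) :=
  [ (["ss2"], 0, 0, "location", "SS2"),
    (["pj", "petaling jaya"], 0, 1, "area", "Petaling Jaya"),
    (["kl", "kuala lumpur"], 0, 2, "area", "Kuala Lumpur"),
    (["time", "hour", "open", "close"], 1, 0, "query_type", "hours"),
    (["address", "where", "direction"], 1, 1, "query_type", "location"),
    (["service", "offer", "available"], 1, 2, "query_type", "services") ]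

-- Python tuple comparison (lexicographic) on a hit (group, rank, field, value)
def pvLt (a b : Int × Int × String × String) : Bool :=
  a.1 < b.1 || (a.1 == b.1 && (a.2.1 < b.2.1 || (a.2.1 == b.2.1 &&
    (decide (a.2.2.1 < b.2.2.1) || (a.2.2.1 == b.2.2.1 && decide (a.2.2.2 < b.2.2.2))))))

-- Python min(…, default=None): first minimal element, none on empty
def pvMin? (l : List (Int × Int × String × String)) : Option (Int × Int × String × String) :=
  l.foldl (fun acc x => match acc with
    | none => some x
    | some m => if pvLt x m then some x else some m) none

def extract_location_info_alt (user_input : String) : List (String × String) :=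
  let text := PySem.Str.lower user_input
  let hits := pvRules.filterMap (fun r =>
    if r.1.any (fun k => PySem.Str.isIn k text) then
      some (r.2.1, r.2.2.1, r.2.2.2.1, r.2.2.2.2)
    else none)
  let info := ([(0 : Int), 1]).foldl (fun info g =>
      match pvMin? (hits.filter (fun h => h.1 == g)) with
      | some best => PySem.Dict.insert info best.2.2.1 best.2.2.2
      | none => info) PySem.Dict.empty
  info.items

-- ===== PRECONDITION & SPEC =====
def Spec_extract_location_info (user_input : String) (out : List (String × String)) : Prop := out = extract_location_info_alt user_input
instance (user_input : String) (out : List (String × String)) : Decidable (Spec_extract_location_info user_input out) := by unfold Spec_extract_location_info; infer_instance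

-- ===== CLAIM (what is proved, stated in full; the proofs are below) =====
def Claim_equal_extract_location_info : Prop := ∀ (user_input : String), Dom_extract_location_info user_input → Spec_extract_location_info user_input (extract_location_info user_input)

-- ===== LEMMAS AND PROOFS =====

-- ===== VERDICT (by name: the statement is the Claim_ definition above) =====
theorem extract_location_info_spec : Claim_equal_extract_location_info := by
  intro s _
  unfold Spec_extract_location_info extract_location_info extract_location_info_alt
  simp only [pvRules, List.filterMap, List.foldl, List.any_cons, List.any_nil,
    Bool.or_false]
  generalize PySem.Str.isIn "ss2" (PySem.Str.lower s) = b1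
  generalize (PySem.Str.isIn "pj" (PySem.Str.lower s) || PySem.Str.isIn "petaling jaya" (PySem.Str.lower s)) = b2
  generalize (PySem.Str.isIn "kl" (PySem.Str.lower s) || PySem.Str.isIn "kuala lumpur" (PySem.Str.lower s)) = b3
  generalize (PySem.Str.isIn "time" (PySem.Str.lower s) || (PySem.Str.isIn "hour" (PySem.Str.lower s) || (PySem.Str.isIn "open" (PySem.Str.lower s) || PySem.Str.isIn "close" (PySem.Str.lower s)))) = b4
  generalize (PySem.Str.isIn "address" (PySem.Str.lower s) || (PySem.Str.isIn "where" (PySem.Str.lower s) || PySem.Str.isIn "direction" (PySem.Str.lower s))) = b5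
  generalize (PySem.Str.isIn "service" (PySem.Str.lower s) || (PySem.Str.isIn "offer" (PySem.Str.lower s) || PySem.Str.isIn "available" (PySem.Str.lower s))) = b6
  revert b1 b2 b3 b4 b5 b6
  decide
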